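-- pv_equiv track=rewrite | github.com/lolpatrol/Advent-of-Code-2018 | Day2.py | part1
-- ===== SOURCE A (Python) =====
-- def has_tuple(letter_dict, num):
--     for value in letter_dict.values():
--         if value == num:
--             return True
--     return False
--
-- def part1(words):
--     has_two = 0
--     has_three = 0
--     for word in words:
--         size = len(word)
--         word_dict = dict()
--         for i in range(0, size):
--             if word[i] not in word_dict:
--                 word_dict[word[i]] = 1
--             else:
--                 word_dict[word[i]] = word_dict[word[i]] + 1
--         if has_tuple(word_dict, 2):
--             has_two += 1
--         if has_tuple(word_dict, 3):
--             has_three += 1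
--     return has_two*has_three
-- ===== SOURCE B (Python) =====
-- def part1(words):
--     has_two = 0
--     has_three = 0
--     for word in words:
--         s = sorted(word)
--         n = len(s)
--         lens = []
--         i = 0
--         while i < n:
--             j = i
--             while j < n and s[j] == s[i]:
--                 j += 1
--             lens.append(j - i)
--             i = j
--         has_two += 1 if 2 in lens else 0
--         has_three += 1 if 3 in lens else 0
--     return has_two * has_three
-- ===== Notes on version B (the rewrite author's own statement) =====
-- stated objective: alternative
-- what changed: Replaces per-word hash-map letter counting followed by a scan over the dict values with sorting each word and a run-length scan over consecutive equal letters, testing 2 and 3 against the list of run lengths.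
import Mathlib
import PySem

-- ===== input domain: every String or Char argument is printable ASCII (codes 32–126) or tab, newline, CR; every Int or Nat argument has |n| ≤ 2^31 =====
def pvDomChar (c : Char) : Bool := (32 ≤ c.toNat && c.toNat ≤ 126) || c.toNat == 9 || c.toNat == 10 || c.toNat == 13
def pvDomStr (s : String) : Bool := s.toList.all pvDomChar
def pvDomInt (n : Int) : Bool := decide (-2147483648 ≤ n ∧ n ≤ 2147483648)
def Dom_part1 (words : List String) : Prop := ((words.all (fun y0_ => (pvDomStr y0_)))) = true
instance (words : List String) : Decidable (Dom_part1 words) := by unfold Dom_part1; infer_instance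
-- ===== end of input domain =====

-- B replaces the per-word dict of letter counts (+ scan over its values) with sorting the word and a run-length scan; alternative algorithm, not claimed faster.

-- ===== PORT A =====
def has_tuple (letter_dict : PySem.Dict Char Int) (num : Int) : Bool :=
  letter_dict.values.any (fun value => value == num)

def part1 (words : List String) : Int :=
  let r := words.foldl (fun (st : Int × Int) word =>
    let size : Int := PySem.Str.len word
    -- for i in range(0, size): word[i] is always in range here, so pyGetD's default is never used
    let word_dict := (PySem.List.pyRange 0 size 1).foldl (fun d i =>
        let c := PySem.List.pyGetD word.toList i ' '
        if ¬ d.contains c then d.insert c 1 else d.insert c (d.getD c 0 + 1))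
      PySem.Dict.empty
    let st := if has_tuple word_dict 2 then (st.1 + 1, st.2) else st
    if has_tuple word_dict 3 then (st.1, st.2 + 1) else st) (0, 0)
  r.1 * r.2

-- ===== PORT B =====
-- the inner while loop of Source B: the lengths of the maximal runs of equal letters
def runLens (cs : List Char) : List Int :=
  match cs with
  | [] => []
  | c :: rest =>
      ((1 + (rest.takeWhile (fun x => x == c)).length : Int)) :: runLens (rest.dropWhile (fun x => x == c))
termination_by cs.length
decreasing_by
  simp only [List.length_cons]
  exact Nat.lt_succ_of_le (List.length_dropWhile_le _ _)

def part1_alt (words : List String) : Int :=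
  let r := words.foldl (fun (st : Int × Int) word =>
    let s := PySem.List.sorted word.toList (fun x => x) false
    let lens := runLens s
    (st.1 + (if lens.contains 2 then 1 else 0), st.2 + (if lens.contains 3 then 1 else 0))) (0, 0)
  r.1 * r.2

-- ===== PRECONDITION & SPEC =====
def Spec_part1 (words : List String) (out : Int) : Prop := out = part1_alt words
instance (words : List String) (out : Int) : Decidable (Spec_part1 words out) := by unfold Spec_part1; infer_instance

-- ===== CLAIM (what is proved, stated in full; the proofs are below) =====
def Claim_equal_part1 : Prop := ∀ (words : List String), Dom_part1 words → Spec_part1 words (part1 words)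

-- ===== LEMMAS AND PROOFS =====

-- A's index loop over a word builds Counter(word)
theorem dict_loop_eq_counter (word : String) :
    (PySem.List.pyRange 0 (PySem.Str.len word) 1).foldl (fun d i =>
        let c := PySem.List.pyGetD word.toList i ' '
        if ¬ d.contains c then d.insert c 1 else d.insert c (d.getD c 0 + 1))
      PySem.Dict.empty = PySem.Dict.counter word.toList := by
  rw [PySem.Str.len_eq]
  rw [PySem.List.foldl_pyRange_zero_pyGetD' (f := fun (d : PySem.Dict Char Int) c =>
        if ¬ d.contains c then d.insert c 1 else d.insert c (d.getD c 0 + 1))]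
  rw [← PySem.Dict.foldl_insert_getD_add_one_eq_counter]
  apply PySem.List.foldl_congr_mem
  intro d c _
  by_cases hc : d.contains c
  · simp [hc]
  · have h0 : d.contains c = false := by simpa using hc
    simp [h0, PySem.Dict.getD_of_not_contains (h := h0)]

-- in a sorted list the first letter's run is exactly all its occurrences, so it is absent from the rest
theorem not_mem_dropWhile_beq (c : Char) (rest : List Char)
    (hle : ∀ x ∈ rest, c ≤ x) (hpw : rest.Pairwise (· ≤ ·)) :
    c ∉ rest.dropWhile (fun x => x == c) := by
  cases hdd : rest.dropWhile (fun x => x == c) with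
  | nil => simp
  | cons hh tt =>
    intro hc
    have hsub : (hh :: tt).Sublist rest := hdd ▸ List.dropWhile_sublist _
    have hpw' := hpw.sublist hsub
    have hne : ¬ (hh == c) = true := by
      have hnil : rest.dropWhile (fun x => x == c) ≠ [] := by simp [hdd]
      have := List.head_dropWhile_not (fun x => x == c) hnil
      simpa [hdd] using this
    have hne' : hh ≠ c := fun he => hne (by simp [he])
    have hch : c ≤ hh := hle hh (hsub.subset (by simp))
    rcases List.mem_cons.mp hc with he | hc'
    · exact hne' he.symm
    · exact hne' (le_antisymm ((List.pairwise_cons.mp hpw').1 c hc') hch)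

-- membership in B's run-length list over a sorted word is "some letter occurs n times"
theorem runLens_mem (cs : List Char) (h : cs.Pairwise (· ≤ ·)) (n : Int) :
    n ∈ runLens cs ↔ ∃ c ∈ cs, (cs.count c : Int) = n := by
  induction cs using runLens.induct with
  | case1 => simp [runLens]
  | case2 c rest ih =>
    have hle : ∀ x ∈ rest, c ≤ x := (List.pairwise_cons.mp h).1
    have hpw : rest.Pairwise (· ≤ ·) := (List.pairwise_cons.mp h).2
    have hcnot : c ∉ rest.dropWhile (fun x => x == c) := not_mem_dropWhile_beq c rest hle hpw
    have hdpw : (rest.dropWhile (fun x => x == c)).Pairwise (· ≤ ·) :=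
      hpw.sublist (List.dropWhile_sublist _)
    have hsplit : rest.takeWhile (fun x => x == c) ++ rest.dropWhile (fun x => x == c) = rest :=
      List.takeWhile_append_dropWhile
    have htc : ∀ x ∈ rest.takeWhile (fun x => x == c), x = c :=
      fun x hx => eq_of_beq (List.mem_takeWhile_imp (p := fun y => y == c) hx)
    have hcount_c : (c :: rest).count c = 1 + (rest.takeWhile (fun x => x == c)).length := by
      rw [List.count_cons_self]
      have h1 : (rest.takeWhile (fun x => x == c)).count c
          = (rest.takeWhile (fun x => x == c)).length :=
        List.count_eq_length.mpr (fun b hb => (htc b hb).symm)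
      have h2 : (rest.dropWhile (fun x => x == c)).count c = 0 := List.count_eq_zero.mpr hcnot
      have hrc : rest.count c = (rest.takeWhile (fun x => x == c)).count c
          + (rest.dropWhile (fun x => x == c)).count c := by
        conv_lhs => rw [← hsplit]
        rw [List.count_append]
      rw [hrc, h1, h2]
      omega
    have hcount_d : ∀ d, d ≠ c → d ∈ rest.dropWhile (fun x => x == c) →
        (c :: rest).count d = (rest.dropWhile (fun x => x == c)).count d := by
      intro d hdc hdd
      have h3 : (rest.takeWhile (fun x => x == c)).count d = 0 :=
        List.count_eq_zero.mpr (fun hdt => hdc (htc d hdt))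
      have hrd : rest.count d = (rest.takeWhile (fun x => x == c)).count d
          + (rest.dropWhile (fun x => x == c)).count d := by
        conv_lhs => rw [← hsplit]
        rw [List.count_append]
      simp only [List.count_cons]
      rw [hrd, h3]
      simp
      exact Ne.symm hdc
    rw [runLens]
    simp only [List.mem_cons]
    constructor
    · rintro (hn | hn)
      · refine ⟨c, by simp, ?_⟩
        rw [hcount_c]; push_cast; omega
      · obtain ⟨d, hd, hcnt⟩ := (ih hdpw).mp hn
        have hdc : d ≠ c := fun he => hcnot (he ▸ hd)
        refine ⟨d, ?_, by rw [hcount_d d hdc hd]; exact hcnt⟩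
        have : d ∈ rest := by rw [← hsplit]; exact List.mem_append.mpr (Or.inr hd)
        exact Or.inr this
    · rintro ⟨d, hdmem, hcnt⟩
      rcases hdmem with he | hdr
      · left; subst he; rw [hcount_c] at hcnt; push_cast at hcnt ⊢; omega
      · rw [← hsplit] at hdr
        rcases List.mem_append.mp hdr with hdt | hdd
        · have hec : d = c := htc d hdt
          subst hec
          left; rw [hcount_c] at hcnt; push_cast at hcnt ⊢; omega
        · have hdc : d ≠ c := fun he => hcnot (he ▸ hdd)
          right
          exact (ih hdpw).mpr ⟨d, hdd, by rw [← hcount_d d hdc hdd]; exact hcnt⟩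

-- the per-word tests agree
theorem word_test_eq (word : String) (n : Int) :
    has_tuple (PySem.Dict.counter word.toList) n
      = (runLens (PySem.List.sorted word.toList (fun x => x) false)).contains n := by
  apply Bool.eq_iff_iff.mpr
  rw [List.contains_iff_mem]
  rw [runLens_mem _ (by simpa using PySem.List.sorted_pairwise word.toList (fun x => x))]
  unfold has_tuple
  rw [List.any_eq_true]
  have hperm := PySem.List.sorted_perm word.toList (fun x => x) false
  constructor
  · rintro ⟨v, hv, hveq⟩
    have hv' : v ∈ (PySem.Dict.counter word.toList).items.map (·.2) := hv
    rw [PySem.Dict.items_counter] at hv'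
    simp only [List.map_map, List.mem_map] at hv'
    obtain ⟨c, hc, hcv⟩ := hv'
    refine ⟨c, ?_, ?_⟩
    · exact (PySem.List.mem_sorted _ _ _ _).mpr ((PySem.Set.mem_ofList _ _).mp hc)
    · rw [hperm.count_eq]
      simp at hcv hveq
      omega
  · rintro ⟨c, hc, hceq⟩
    refine ⟨(word.toList.count c : Int), ?_, by rw [hperm.count_eq c] at hceq; simpa using hceq⟩
    show _ ∈ (PySem.Dict.counter word.toList).items.map (·.2)
    rw [PySem.Dict.items_counter]
    simp only [List.map_map, List.mem_map]
    exact ⟨c, (PySem.Set.mem_ofList _ _).mpr ((PySem.List.mem_sorted _ _ _ _).mp hc), rfl⟩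

-- ===== VERDICT (by name: the statement is the Claim_ definition above) =====
theorem part1_spec : Claim_equal_part1 := by
  intro words _
  unfold Spec_part1 part1 part1_alt
  have hfun : (fun (st : Int × Int) (word : String) =>
      let size : Int := PySem.Str.len word
      let word_dict := (PySem.List.pyRange 0 size 1).foldl (fun d i =>
          let c := PySem.List.pyGetD word.toList i ' '
          if ¬ d.contains c then d.insert c 1 else d.insert c (d.getD c 0 + 1))
        PySem.Dict.empty
      let st := if has_tuple word_dict 2 then (st.1 + 1, st.2) else st
      if has_tuple word_dict 3 then (st.1, st.2 + 1) else st)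
    = (fun (st : Int × Int) (word : String) =>
      let s := PySem.List.sorted word.toList (fun x => x) false
      let lens := runLens s
      (st.1 + (if lens.contains 2 then 1 else 0), st.2 + (if lens.contains 3 then 1 else 0))) := by
    funext st word
    simp only [dict_loop_eq_counter, word_test_eq]
    cases h2 : (runLens (PySem.List.sorted word.toList (fun x => x) false)).contains 2 <;>
      cases h3 : (runLens (PySem.List.sorted word.toList (fun x => x) false)).contains 3 <;>
        simp
  rw [hfun]
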